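-- pv_equiv track=rewrite | github.com/CaufieldZ/pm-workspace-public | scripts/dashboard.py | render_hooks
-- ===== SOURCE A (Python) =====
-- from collections import Counter, defaultdict
--
-- def render_hooks(events, days):
--     hook_events = [e for e in events if e.get("type") in ("hook", "gate")]
--     by_name = defaultdict(lambda: defaultdict(int))
--     for e in hook_events:
--         by_name[e["name"]][e["action"]] += 1
--
--     if not by_name:
--         return "_过去 {} 天无 hook 触发_".format(days)
--
--     lines = [
--         f"| Hook | triggered | warn | block | clean | skip | 诊断 |",
--         "|------|-----------|------|-------|-------|------|------|",
--     ]
--     for name in sorted(by_name.keys()):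
--         a = by_name[name]
--         total = sum(a.values())
--         diag = ""
--         if a["block"] > 5:
--             diag = "🛡 真护栏"
--         elif a["warn"] > 0 and a["block"] == 0:
--             diag = "⚠️ 只警告未升级"
--         elif total == 0:
--             diag = "🔘 未触发"
--         lines.append(
--             f"| {name} | {a['triggered']} | {a['warn']} | {a['block']} | {a['clean']} | {a['skip']} | {diag} |"
--         )
--     return "\n".join(lines)
-- ===== SOURCE B (Python) =====
-- def render_hooks(events, days):
--     hooks = [e for e in events if e.get("type") in ("hook", "gate")]
--     if not hooks:
--         return "_过去 {} 天无 hook 触发_".format(days)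
--     lines = [
--         "| Hook | triggered | warn | block | clean | skip | 诊断 |",
--         "|------|-----------|------|-------|-------|------|------|",
--     ]
--     for name in sorted({e["name"] for e in hooks}):
--         acts = [e["action"] for e in hooks if e["name"] == name]
--         if acts.count("block") > 5:
--             diag = "🛡 真护栏"
--         elif acts.count("warn") > 0 and acts.count("block") == 0:
--             diag = "⚠️ 只警告未升级"
--         else:
--             diag = ""
--         lines.append(
--             "| {} | {} | {} | {} | {} | {} | {} |".format(
--                 name,
--                 acts.count("triggered"),
--                 acts.count("warn"),
--                 acts.count("block"),
--                 acts.count("clean"),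
--                 acts.count("skip"),
--                 diag,
--             )
--         )
--     return "\n".join(lines)
-- ===== Notes on version B (the rewrite author's own statement) =====
-- stated objective: alternative
-- what changed: Replaces A's defaultdict-of-defaultdict hash aggregation followed by a key sort with sorting the distinct hook names and computing each row's action counts by per-name list.count scans (and drops A's dead total==0 branch, which is provably unreachable).
import Mathlib
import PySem

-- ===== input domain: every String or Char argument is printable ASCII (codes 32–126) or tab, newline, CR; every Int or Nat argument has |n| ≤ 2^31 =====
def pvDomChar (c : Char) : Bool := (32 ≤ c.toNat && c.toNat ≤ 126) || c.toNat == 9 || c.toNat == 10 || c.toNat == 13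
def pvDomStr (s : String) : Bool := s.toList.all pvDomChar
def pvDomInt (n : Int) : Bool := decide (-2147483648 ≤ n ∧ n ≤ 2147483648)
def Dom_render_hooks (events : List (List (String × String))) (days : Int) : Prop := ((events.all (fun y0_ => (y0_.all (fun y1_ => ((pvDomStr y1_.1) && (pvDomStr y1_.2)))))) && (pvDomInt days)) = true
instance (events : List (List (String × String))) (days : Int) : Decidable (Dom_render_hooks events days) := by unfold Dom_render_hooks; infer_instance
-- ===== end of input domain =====

-- B replaces A's defaultdict-of-Counter aggregation (then key sort) by sorted distinct names with per-name count scans; objective: alternative (same output, no speed claim).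

-- ===== PORT A =====
-- e.get("type") in ("hook", "gate")
def pvIsHook (e : List (String × String)) : Bool :=
  let t := (PySem.Dict.mk e).get? "type"
  t == some "hook" || t == some "gate"

-- e["name"] / e["action"]: total forms, exact under Pre_ (the key is present)
def pvName (e : List (String × String)) : String := (PySem.Dict.mk e).getD "name" ""
def pvAct (e : List (String × String)) : String := (PySem.Dict.mk e).getD "action" ""

def pvHeader : List String :=
  ["| Hook | triggered | warn | block | clean | skip | 诊断 |",
   "|------|-----------|------|-------|-------|------|------|"]

-- the body of A's `for name in sorted(by_name.keys())` loop: one formatted row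
def pvRowA (by_name : PySem.Dict String (PySem.Dict String Int)) (name : String) : String :=
  let a := by_name.getD name PySem.Dict.empty
  let total := a.values.sum
  let diag :=
    if a.getD "block" 0 > 5 then "🛡 真护栏"
    else if a.getD "warn" 0 > 0 && a.getD "block" 0 == 0 then "⚠️ 只警告未升级"
    else if total == 0 then "🔘 未触发"
    else ""
  "| " ++ name ++ " | " ++ PySem.Int.toStr (a.getD "triggered" 0)
  ++ " | " ++ PySem.Int.toStr (a.getD "warn" 0)
  ++ " | " ++ PySem.Int.toStr (a.getD "block" 0)
  ++ " | " ++ PySem.Int.toStr (a.getD "clean" 0)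
  ++ " | " ++ PySem.Int.toStr (a.getD "skip" 0)
  ++ " | " ++ diag ++ " |"

def render_hooks (events : List (List (String × String))) (days : Int) : String :=
  let hook_events := events.filter pvIsHook
  let by_name : PySem.Dict String (PySem.Dict String Int) :=
    hook_events.foldl
      (fun d e => d.modify (pvName e) PySem.Dict.empty
        (fun inner => inner.modify (pvAct e) 0 (· + 1)))
      PySem.Dict.empty
  if by_name.size == 0 then
    "_过去 " ++ PySem.Int.toStr days ++ " 天无 hook 触发_"
  else
    let lines :=
      (PySem.List.sorted by_name.keys (fun x => x) false).foldl
        (fun ls name => ls ++ [pvRowA by_name name]) pvHeader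
    PySem.Str.join "\n" lines

-- ===== PORT B =====
-- B's loop body: per-name count scans over the filtered events
def pvRowB (hooks : List (List (String × String))) (name : String) : String :=
  let acts := (hooks.filter (fun e => pvName e == name)).map pvAct
  let diag :=
    if (acts.count "block" : Int) > 5 then "🛡 真护栏"
    else if (acts.count "warn" : Int) > 0 && (acts.count "block" : Int) == 0 then "⚠️ 只警告未升级"
    else ""
  "| " ++ name ++ " | " ++ PySem.Int.toStr (acts.count "triggered" : Int)
  ++ " | " ++ PySem.Int.toStr (acts.count "warn" : Int)
  ++ " | " ++ PySem.Int.toStr (acts.count "block" : Int)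
  ++ " | " ++ PySem.Int.toStr (acts.count "clean" : Int)
  ++ " | " ++ PySem.Int.toStr (acts.count "skip" : Int)
  ++ " | " ++ diag ++ " |"

def render_hooks_alt (events : List (List (String × String))) (days : Int) : String :=
  let hooks := events.filter pvIsHook
  if hooks.isEmpty then
    "_过去 " ++ PySem.Int.toStr days ++ " 天无 hook 触发_"
  else
    let rows :=
      (PySem.List.sorted (PySem.Set.ofList (hooks.map pvName)) (fun x => x) false).map
        (pvRowB hooks)
    PySem.Str.join "\n" (pvHeader ++ rows)

-- ===== PRECONDITION & SPEC =====
-- A raises KeyError when some hook/gate event lacks the key "name" or "action"; Pre_ excludes exactly those inputs.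
def Pre_render_hooks (events : List (List (String × String))) (days : Int) : Prop :=
  ∀ e ∈ events, pvIsHook e = true →
    (PySem.Dict.mk e).contains "name" = true ∧ (PySem.Dict.mk e).contains "action" = true
instance (events : List (List (String × String))) (days : Int) : Decidable (Pre_render_hooks events days) := by unfold Pre_render_hooks; infer_instance
def pvWitness_render_hooks : (List (List (String × String))) × Int :=
  ([[("type", "hook"), ("name", "a"), ("action", "warn")]], 7)
def Spec_render_hooks (events : List (List (String × String))) (days : Int) (out : String) : Prop := out = render_hooks_alt events days
instance (events : List (List (String × String))) (days : Int) (out : String) : Decidable (Spec_render_hooks events days out) := by unfold Spec_render_hooks; infer_instance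

-- ===== CLAIM (what is proved, stated in full; the proofs are below) =====
def Claim_equal_render_hooks : Prop := ∀ (events : List (List (String × String))) (days : Int), Dom_render_hooks events days → Pre_render_hooks events days → Spec_render_hooks events days (render_hooks events days)

-- ===== LEMMAS AND PROOFS =====

-- A's grouped fold, looked up at one name, is the counting fold over exactly that name's events
lemma pv_group (l : List (List (String × String))) (d : PySem.Dict String (PySem.Dict String Int)) (n : String) :
    (l.foldl (fun d e => d.modify (pvName e) PySem.Dict.empty
        (fun inner => inner.modify (pvAct e) 0 (· + 1))) d).getD n PySem.Dict.empty
    = ((l.filter (fun e => pvName e == n)).map pvAct).foldl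
        (fun inner x => inner.modify x 0 (· + 1)) (d.getD n PySem.Dict.empty) := by
  induction l generalizing d with
  | nil => rfl
  | cons e t ih =>
    simp only [List.foldl_cons, List.filter_cons]
    by_cases h : pvName e = n
    · simp [h, ih]
    · simp [h, ih, PySem.Dict.getD_modify, Ne.symm h]

lemma pv_keys (l : List (List (String × String))) :
    (l.foldl (fun d e => d.modify (pvName e) PySem.Dict.empty
        (fun inner => inner.modify (pvAct e) 0 (· + 1))) (PySem.Dict.empty : PySem.Dict String (PySem.Dict String Int))).keys
    = PySem.Set.ofList (l.map pvName) := by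
  rw [PySem.Dict.keys_foldl_modify_key]
  simp [PySem.Set.ofList_eq_foldl, PySem.Set.update, PySem.Dict.keys_empty]

-- the counts of the distinct elements sum to the length
lemma pv_sum_counts (l : List String) :
    ((PySem.Set.ofList l).map (fun x => (l.count x : Int))).sum = (l.length : Int) := by
  have h1 := PySem.Set.nodup_ofList (xs := l)
  have h2 : ∀ a, a ∈ PySem.Set.ofList l ↔ a ∈ l := fun a => PySem.Set.mem_ofList l a
  have hperm : (PySem.Set.ofList l).Perm l.dedup := by
    rw [List.perm_ext_iff_of_nodup h1 l.nodup_dedup]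
    simpa [List.mem_dedup] using h2
  have h3 : ((PySem.Set.ofList l).map (fun x => l.count x)).sum = l.length := by
    rw [(hperm.map (fun x => l.count x)).sum_eq, List.sum_map_count_dedup_eq_length]
  calc ((PySem.Set.ofList l).map (fun x => (l.count x : Int))).sum
      = (((PySem.Set.ofList l).map (fun x => l.count x)).map (Nat.cast : Nat → Int)).sum := by
        rw [List.map_map]; rfl
    _ = (l.length : Int) := by rw [← Nat.cast_list_sum, h3]

lemma pv_a_eq_counter (l : List (List (String × String))) (n : String) :
    (l.foldl (fun d e => d.modify (pvName e) PySem.Dict.empty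
        (fun inner => inner.modify (pvAct e) 0 (· + 1))) PySem.Dict.empty).getD n PySem.Dict.empty
    = PySem.Dict.counter ((l.filter (fun e => pvName e == n)).map pvAct) := by
  rw [pv_group, PySem.Dict.getD_empty, PySem.Dict.counter_eq_foldl]

lemma pv_values_sum (xs : List String) :
    (PySem.Dict.counter xs).values.sum = (xs.length : Int) := by
  have : (PySem.Dict.counter xs).values = (PySem.Set.ofList xs).map (fun k => (xs.count k : Int)) := by
    simp [PySem.Dict.values, PySem.Dict.items_counter, List.map_map]
  rw [this, pv_sum_counts]

lemma pv_main (events : List (List (String × String))) (days : Int) :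
    render_hooks events days = render_hooks_alt events days := by
  by_cases h : events.filter pvIsHook = []
  · simp [render_hooks, render_hooks_alt, h]
  · have hkeys := pv_keys (events.filter pvIsHook)
    have hsz : ((events.filter pvIsHook).foldl (fun d e => d.modify (pvName e) PySem.Dict.empty
        (fun inner => inner.modify (pvAct e) 0 (· + 1))) (PySem.Dict.empty : PySem.Dict String (PySem.Dict String Int))).size ≠ 0 := by
      have : ((events.filter pvIsHook).foldl (fun d e => d.modify (pvName e) PySem.Dict.empty
        (fun inner => inner.modify (pvAct e) 0 (· + 1))) (PySem.Dict.empty : PySem.Dict String (PySem.Dict String Int))).keys ≠ [] := by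
        rw [hkeys]
        rcases List.exists_mem_of_ne_nil _ h with ⟨e, he⟩
        intro hnil
        have : pvName e ∈ PySem.Set.ofList ((events.filter pvIsHook).map pvName) :=
          (PySem.Set.mem_ofList _ _).mpr (List.mem_map_of_mem he)
        simp [hnil] at this
      simpa [PySem.Dict.keys, PySem.Dict.size] using fun hh => this (by simp [PySem.Dict.keys, hh])
    simp only [render_hooks, render_hooks_alt]
    rw [if_neg (by simpa using hsz), if_neg (by simpa [List.isEmpty_iff] using h)]
    rw [PySem.List.foldl_append_singleton_eq_map]
    congr 1
    rw [hkeys]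
    apply congrArg
    apply List.map_congr_left
    intro n hn
    have hmem : n ∈ PySem.Set.ofList ((events.filter pvIsHook).map pvName) :=
      (PySem.List.mem_sorted _ _ _ _).mp hn
    have hex : ∃ e ∈ events.filter pvIsHook, pvName e = n := by
      simpa [List.mem_map] using (PySem.Set.mem_ofList _ _).mp hmem
    rcases hex with ⟨e, he, hne⟩
    obtain ⟨hev, hhk⟩ := List.mem_filter.mp he
    have hcond : ¬ (∀ a ∈ events, pvName a = n → pvIsHook a = false) := fun hall => by
      have := hall e hev hne; rw [hhk] at this; simp at this
    simp only [pvRowA, pvRowB, pv_a_eq_counter, PySem.Dict.getD_counter, pv_values_sum]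
    simp [hcond]

-- ===== VERDICT (by name: the statement is the Claim_ definition above) =====
theorem render_hooks_spec : Claim_equal_render_hooks := by
  intro events days _ _
  exact pv_main events days
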